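-- pv_equiv track=rewrite | github.com/google-parfait/tensorflow-federated | tensorflow_federated/python/research/utils/utils_impl.py | hparams_to_str
-- ===== SOURCE A (Python) =====
-- from typing import Dict, Iterable, Iterator, List, Mapping, Optional, Sequence, Union
--
-- def hparams_to_str(wid: int,
--                    param_dict: Mapping[str, str],
--                    short_names: Optional[Mapping[str, str]] = None) -> str:
--   """Convenience method which flattens the hparams to a string.
--
--   Used as mapping function for the WorkUnitCustomiser.
--
--   Args:
--     wid: Work unit id, int type.
--     param_dict: A dict of parameters.
--     short_names: A dict of mappings of parameter names.
--
--   Returns: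
--     The hparam string.
--   """
--   if not param_dict:
--     return str(wid)
--
--   if not short_names:
--     short_names = {}
--
--   name = [
--       '{}={}'.format(short_names.get(k, k), str(v))
--       for k, v in sorted(param_dict.items())
--   ]
--   hparams_str = '{}-{}'.format(str(wid), ','.join(name))
--
--   # Escape some special characters
--   replace_str = {
--       '\n': ',',
--       ':': '=',
--       '\'': '',
--       '"': '',
--   }
--   for c, new_c in replace_str.items():
--     hparams_str = hparams_str.replace(c, new_c)
--   for c in ('\\', '/', '[', ']', '(', ')', '{', '}', '%'):
--     hparams_str = hparams_str.replace(c, '-')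
--   if len(hparams_str) > 170:
--     raise ValueError(
--         'hparams_str string is too long ({}). You can input a short_name dict '
--         'to map the long parameter name to a short name. For example, '
--         ' launch_experiment(executable, grid_iter, '
--         ' {{server_learning_rate: s_lr}}) \n'
--         'Received: {}'.format(len(hparams_str), hparams_str))
--   return hparams_str
-- ===== SOURCE B (Python) =====
-- _TRANS = {'\n': ',', ':': '=', "'": '', '"': '',
--           '\\': '-', '/': '-', '[': '-', ']': '-',
--           '(': '-', ')': '-', '{': '-', '}': '-', '%': '-'}
--
--
-- def _escape(s):
--   """Escape the special characters of one component in a single pass."""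
--   return ''.join(_TRANS.get(c, c) for c in s)
--
--
-- def hparams_to_str(wid, param_dict, short_names=None):
--   if not param_dict:
--     return str(wid)
--   if not short_names:
--     short_names = {}
--   pieces = [
--       '{}={}'.format(_escape(short_names.get(k, k)), _escape(str(v)))
--       for k, v in sorted(param_dict.items())
--   ]
--   hparams_str = '{}-{}'.format(str(wid), ','.join(pieces))
--   if len(hparams_str) > 170:
--     raise ValueError(
--         'hparams_str string is too long ({}). You can input a short_name dict '
--         'to map the long parameter name to a short name. For example, '
--         ' launch_experiment(executable, grid_iter, '
--         ' {{server_learning_rate: s_lr}}) \n'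
--         'Received: {}'.format(len(hparams_str), hparams_str))
--   return hparams_str
-- ===== Notes on version B (the rewrite author's own statement) =====
-- stated objective: idiomatic
-- what changed: A escapes by running thirteen sequential full-string str.replace passes over the assembled string; B instead escapes each name and value component in a single pass with one character-translation table (dict lookup per character) before assembly, which is valid because no replacement output is itself a replaced character and the separators str(wid), '-', '=', ',' are never escaped.
import Mathlib
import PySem

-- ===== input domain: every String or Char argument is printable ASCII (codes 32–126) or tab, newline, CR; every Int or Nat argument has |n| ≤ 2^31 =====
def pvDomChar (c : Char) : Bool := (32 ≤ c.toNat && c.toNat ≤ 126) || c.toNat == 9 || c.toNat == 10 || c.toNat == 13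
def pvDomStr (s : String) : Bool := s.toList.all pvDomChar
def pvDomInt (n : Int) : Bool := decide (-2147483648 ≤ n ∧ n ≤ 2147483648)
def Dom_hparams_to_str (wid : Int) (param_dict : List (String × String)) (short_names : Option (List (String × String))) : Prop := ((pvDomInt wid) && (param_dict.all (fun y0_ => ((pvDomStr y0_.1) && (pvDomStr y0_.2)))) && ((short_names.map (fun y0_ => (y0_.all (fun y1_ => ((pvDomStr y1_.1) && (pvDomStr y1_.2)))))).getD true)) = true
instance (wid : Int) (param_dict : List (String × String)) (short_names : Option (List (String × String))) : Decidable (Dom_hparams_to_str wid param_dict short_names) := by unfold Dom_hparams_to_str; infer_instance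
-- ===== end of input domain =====

-- B replaces A's thirteen sequential str.replace passes by one per-component
-- character-translation pass (a single table lookup per character); same return value.

-- ===== PORT A =====
def hparams_to_str (wid : Int) (param_dict : List (String × String)) (short_names : Option (List (String × String))) : String :=
  if param_dict.isEmpty then PySem.Int.toStr wid else
  -- `if not short_names: short_names = {}`; lookups on {} and on None-replaced-by-{} agree
  let sn : PySem.Dict String String := PySem.Dict.ofList (short_names.getD [])
  let name : List String :=
    (PySem.List.sorted2 (PySem.Dict.ofList param_dict).items (fun p => p.1) (fun p => p.2)).map
      (fun p => sn.getD p.1 p.1 ++ "=" ++ p.2)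
  let s0 := PySem.Int.toStr wid ++ "-" ++ PySem.Str.join "," name
  -- for c, new_c in replace_str.items(): hparams_str = hparams_str.replace(c, new_c)
  let s1 := PySem.Str.replace s0 "\n" ","
  let s2 := PySem.Str.replace s1 ":" "="
  let s3 := PySem.Str.replace s2 "\'" ""
  let s4 := PySem.Str.replace s3 "\"" ""
  -- for c in ('\\', '/', '[', ']', '(', ')', '{', '}', '%'): … .replace(c, '-')
  let s5 := ["\\", "/", "[", "]", "(", ")", "{", "}", "%"].foldl
      (fun s c => PySem.Str.replace s c "-") s4
  -- the `len > 170` ValueError branch is exactly the inputs excluded by Pre_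
  s5

-- ===== PORT B =====
-- _TRANS.get(c, c) of Source B (a literal dict of single characters)
def pyTransGet (c : Char) : String :=
  if c = '\n' then "," else if c = ':' then "=" else
  if c = '\'' then "" else if c = '\"' then "" else
  if c = '\\' then "-" else if c = '/' then "-" else
  if c = '[' then "-" else if c = ']' then "-" else
  if c = '(' then "-" else if c = ')' then "-" else
  if c = '{' then "-" else if c = '}' then "-" else
  if c = '%' then "-" else String.ofList [c]

-- _escape(s) = ''.join(_TRANS.get(c, c) for c in s)
def pyEscape (s : String) : String := PySem.Str.join "" (s.toList.map pyTransGet)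

def hparams_to_str_alt (wid : Int) (param_dict : List (String × String)) (short_names : Option (List (String × String))) : String :=
  if param_dict.isEmpty then PySem.Int.toStr wid else
  let sn : PySem.Dict String String := PySem.Dict.ofList (short_names.getD [])
  let pieces : List String :=
    (PySem.List.sorted2 (PySem.Dict.ofList param_dict).items (fun p => p.1) (fun p => p.2)).map
      (fun p => pyEscape (sn.getD p.1 p.1) ++ "=" ++ pyEscape p.2)
  -- the `len > 170` ValueError branch is exactly the inputs excluded by Pre_
  PySem.Int.toStr wid ++ "-" ++ PySem.Str.join "," pieces

-- ===== PRECONDITION & SPEC =====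
-- A raises ValueError exactly when the escaped string is longer than 170 characters;
-- Pre_ states that bound arithmetically: the escape step keeps every character except
-- the two quote characters, which it deletes, so the final length is computable from
-- the component lengths alone.
def pvNoQuoteLen (s : String) : Nat := (s.toList.filter (fun c => c ≠ '\'' ∧ c ≠ '\"')).length

def Pre_hparams_to_str (wid : Int) (param_dict : List (String × String)) (short_names : Option (List (String × String))) : Prop :=
  param_dict = [] ∨
    (PySem.Int.toChars wid).length +
      (((PySem.Dict.ofList param_dict).items).map
        (fun p => pvNoQuoteLen ((PySem.Dict.ofList (short_names.getD [])).getD p.1 p.1) +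
                  pvNoQuoteLen p.2 + 2)).sum ≤ 170

instance (wid : Int) (param_dict : List (String × String)) (short_names : Option (List (String × String))) : Decidable (Pre_hparams_to_str wid param_dict short_names) := by unfold Pre_hparams_to_str; infer_instance

def pvWitness_hparams_to_str : Int × (List (String × String)) × (Option (List (String × String))) :=
  (3, [("learning_rate", "0.1"), ("epochs", "5")], some [("learning_rate", "lr")])

def Spec_hparams_to_str (wid : Int) (param_dict : List (String × String)) (short_names : Option (List (String × String))) (out : String) : Prop := out = hparams_to_str_alt wid param_dict short_names
instance (wid : Int) (param_dict : List (String × String)) (short_names : Option (List (String × String))) (out : String) : Decidable (Spec_hparams_to_str wid param_dict short_names out) := by unfold Spec_hparams_to_str; infer_instance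

-- ===== CLAIM (what is proved, stated in full; the proofs are below) =====
def Claim_equal_hparams_to_str : Prop := ∀ (wid : Int) (param_dict : List (String × String)) (short_names : Option (List (String × String))), Dom_hparams_to_str wid param_dict short_names → Pre_hparams_to_str wid param_dict short_names → Spec_hparams_to_str wid param_dict short_names (hparams_to_str wid param_dict short_names)

-- ===== LEMMAS AND PROOFS =====

-- the character table of Source B at the List-Char level
def trChar (c : Char) : List Char := (pyTransGet c).toList

-- replacing one single character is a flatMap over the characters
theorem go_single (c : Char) (t : List Char) :
    ∀ (l acc : List Char), PySem.Chars.replace.go [c] t l.length l acc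
      = acc.reverse ++ l.flatMap (fun x => if x = c then t else [x]) := by
  intro l
  induction l with
  | nil => intro acc; simp [PySem.Chars.replace.go]
  | cons a l ih =>
    intro acc
    show PySem.Chars.replace.go [c] t (l.length + 1) (a :: l) acc = _
    rw [PySem.Chars.replace.go]
    by_cases h : a = c
    · subst h
      simp [List.isPrefixOf, ih, List.flatMap_cons]
    · simp only [List.isPrefixOf, h, ih, List.flatMap_cons]
      simp [ih]
      intro hc
      exact absurd hc.symm h

theorem replace_single (c : Char) (t : List Char) (l : List Char) :
    PySem.Chars.replace l [c] t = l.flatMap (fun x => if x = c then t else [x]) := by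
  show PySem.Chars.replace.go [c] t l.length l [] = _
  simpa using go_single c t l []

-- join with the empty separator is flatten
theorem join_nil_flatten (ls : List (List Char)) : PySem.Chars.join [] ls = ls.flatten := by
  induction ls with
  | nil => simp [PySem.Chars.join_nil]
  | cons a ls ih =>
    cases ls with
    | nil => simp [PySem.Chars.join_singleton]
    | cons b rest => rw [PySem.Chars.join_cons_cons]; simp_all

-- a table that fixes ',' distributes over a ','-join
theorem flatMap_join_comma (f : Char → List Char) (hf : f ',' = [','])
    (ls : List (List Char)) :
    (PySem.Chars.join [','] ls).flatMap f = PySem.Chars.join [','] (ls.map (·.flatMap f)) := by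
  induction ls with
  | nil => simp [PySem.Chars.join_nil]
  | cons a ls ih =>
    cases ls with
    | nil => simp [PySem.Chars.join_singleton]
    | cons b rest =>
      rw [PySem.Chars.join_cons_cons]
      simp only [List.map_cons]
      rw [PySem.Chars.join_cons_cons]
      simp only [List.flatMap_append, ih, List.flatMap_cons, List.flatMap_nil, hf, List.map_cons]
      simp

-- str(wid) contains only digits and '-', which the table leaves alone
theorem trChar_digitChar (m : Nat) (h : m < 10) : trChar (Nat.digitChar m) = [Nat.digitChar m] := by
  interval_cases m <;> decide

theorem toDigitsCore_fixed (f : Nat) : ∀ (n : Nat) (acc : List Char),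
    (∀ c ∈ acc, trChar c = [c]) → ∀ c ∈ Nat.toDigitsCore 10 f n acc, trChar c = [c] := by
  induction f with
  | zero => intro n acc hacc; simpa [Nat.toDigitsCore] using hacc
  | succ f ih =>
    intro n acc hacc
    rw [Nat.toDigitsCore]
    have hd : ∀ c ∈ Nat.digitChar (n % 10) :: acc, trChar c = [c] := by
      intro c hc
      rcases List.mem_cons.mp hc with h | h
      · subst h; exact trChar_digitChar _ (Nat.mod_lt _ (by norm_num))
      · exact hacc c h
    split
    · exact hd
    · exact ih _ _ hd

theorem trChar_toChars (n : Int) : (PySem.Int.toChars n).flatMap trChar = PySem.Int.toChars n := by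
  have hdig : ∀ (m : Nat) (c : Char), c ∈ Nat.toDigits 10 m → trChar c = [c] := by
    intro m c hc
    exact toDigitsCore_fixed _ _ _ (by simp) c hc
  have : ∀ c ∈ PySem.Int.toChars n, trChar c = [c] := by
    intro c hc
    unfold PySem.Int.toChars at hc
    split at hc
    · rcases List.mem_cons.mp hc with h | h
      · subst h; decide
      · exact hdig _ _ h
    · exact hdig _ _ hc
  calc (PySem.Int.toChars n).flatMap trChar
      = (PySem.Int.toChars n).flatMap (fun x => [x]) := List.flatMap_congr this
    _ = _ := List.flatMap_singleton' _

-- the thirteen sequential single-character replaces of A are one pass of the table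
theorem escA_eq (s : String) :
    (["\\", "/", "[", "]", "(", ")", "{", "}", "%"].foldl (fun s c => PySem.Str.replace s c "-")
      (PySem.Str.replace (PySem.Str.replace (PySem.Str.replace (PySem.Str.replace s "\n" ",") ":" "=") "\'" "") "\"" "")).toList
    = s.toList.flatMap trChar := by
  simp only [List.foldl_cons, List.foldl_nil, PySem.Str.toList_replace]
  simp only [String.reduceToList]
  simp only [replace_single, List.flatMap_assoc]
  apply List.flatMap_congr
  intro x _
  by_cases h1 : x = '\n'; · subst h1; decide
  by_cases h2 : x = ':'; · subst h2; decide
  by_cases h3 : x = '\''; · subst h3; decide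
  by_cases h4 : x = '\"'; · subst h4; decide
  by_cases h5 : x = '\\'; · subst h5; decide
  by_cases h6 : x = '/'; · subst h6; decide
  by_cases h7 : x = '['; · subst h7; decide
  by_cases h8 : x = ']'; · subst h8; decide
  by_cases h9 : x = '('; · subst h9; decide
  by_cases h10 : x = ')'; · subst h10; decide
  by_cases h11 : x = '{'; · subst h11; decide
  by_cases h12 : x = '}'; · subst h12; decide
  by_cases h13 : x = '%'; · subst h13; decide
  simp [trChar, pyTransGet, h1,h2,h3,h4,h5,h6,h7,h8,h9,h10,h11,h12,h13]

theorem toList_pyEscape (s : String) : (pyEscape s).toList = s.toList.flatMap trChar := by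
  unfold pyEscape
  rw [PySem.Str.toList_join]
  simp only [String.reduceToList]
  rw [join_nil_flatten]
  simp only [List.map_map, List.flatMap_def]
  rfl

theorem hparams_to_str_spec' (wid : Int) (param_dict : List (String × String)) (short_names : Option (List (String × String))) :
    hparams_to_str wid param_dict short_names = hparams_to_str_alt wid param_dict short_names := by
  unfold hparams_to_str hparams_to_str_alt
  by_cases hpd : param_dict.isEmpty
  · simp [hpd]
  · simp only [hpd, Bool.false_eq_true, if_false]
    apply String.toList_inj.mp
    rw [escA_eq]
    simp only [String.toList_append, PySem.Int.toList_toStr, PySem.Str.toList_join,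
      String.reduceToList]
    rw [List.flatMap_append, List.flatMap_append, trChar_toChars]
    rw [flatMap_join_comma trChar (by decide)]
    simp only [List.map_map]
    have hpc : ∀ (p : String × String),
        List.flatMap trChar ((PySem.Dict.ofList (short_names.getD [])).getD p.1 p.1 ++ "=" ++ p.2).toList =
        (pyEscape ((PySem.Dict.ofList (short_names.getD [])).getD p.1 p.1) ++ "=" ++ pyEscape p.2).toList := by
      intro p
      simp only [String.toList_append, List.flatMap_append, toList_pyEscape, String.reduceToList]
      rw [show List.flatMap trChar ['='] = ['='] from by decide]
    rw [show List.flatMap trChar ['-'] = ['-'] from by decide]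
    simp only [Function.comp_def, hpc]

-- ===== VERDICT (by name: the statement is the Claim_ definition above) =====
theorem hparams_to_str_spec : Claim_equal_hparams_to_str := by
  intro wid pd sn _ _
  exact hparams_to_str_spec' wid pd sn
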